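-- pv_equiv track=rewrite | github.com/szymongalecki/Advent-of-Code-2025 | 3.py | overclock
-- ===== SOURCE A (Python) =====
-- def overclock(bank: list[int]) -> int:
--     def batteries(start: int, selected: list[int]) -> list[int]:
--         if len(selected) == 12:
--             return selected
--         s_v = 0
--         s_i = 0
--         for i in range(start, len(bank) - 12 + len(selected) + 1):
--             if bank[i] > s_v:
--                 s_v = bank[i]
--                 s_i = i
--         return batteries(s_i + 1, selected + [s_v])
--
--     def joltage(batteries: list[int]) -> int:
--         return sum(d * (10**i) for (i, d) in enumerate(reversed(batteries)))
--
--     return joltage(batteries(0, []))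
-- ===== SOURCE B (Python) =====
-- def overclock(bank: list[int]) -> int:
--     n = len(bank)
--     start = 0
--     result = 0
--     for c in range(12):
--         best_v = 0
--         best_i = 0
--         for i in range(start, n - 11 + c):
--             if bank[i] > best_v:
--                 best_v = bank[i]
--                 best_i = i
--         start = best_i + 1
--         result = result * 10 + best_v
--     return result
-- ===== Notes on version B (the rewrite author's own statement) =====
-- stated objective: simpler
-- what changed: Replaces the accumulator-passing recursion that builds a 12-element list and then sums digit*10^i over a reversed enumerate with a single iterative 12-step loop that folds the result by Horner's rule (result = result*10 + value), never materialising the selected list.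
import Mathlib
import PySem

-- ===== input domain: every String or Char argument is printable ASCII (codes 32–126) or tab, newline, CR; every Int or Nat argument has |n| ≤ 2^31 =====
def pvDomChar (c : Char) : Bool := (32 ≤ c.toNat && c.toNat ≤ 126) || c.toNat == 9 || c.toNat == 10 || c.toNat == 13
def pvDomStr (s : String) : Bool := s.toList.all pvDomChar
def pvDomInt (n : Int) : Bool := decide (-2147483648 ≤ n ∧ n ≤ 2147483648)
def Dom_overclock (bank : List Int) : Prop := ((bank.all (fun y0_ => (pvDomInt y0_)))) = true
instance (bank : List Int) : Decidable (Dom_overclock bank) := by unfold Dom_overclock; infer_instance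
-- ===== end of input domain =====

-- B replaces A's accumulator-passing recursion (build a 12-element list, then sum digit*10^i
-- over a reversed enumerate) with one iterative 12-step loop folding the answer by Horner's rule.

-- ===== PORT A =====
-- inner 'for i in range(start, …)' loop of `batteries`; bank[i] is always in range when called
-- from `overclock` (0 ≤ start, stop ≤ len bank), so pyGetD … 0 is exact there
def overclockScanA (bank : List Int) (start stop : Int) : Int × Int :=
  (PySem.List.pyRange start stop 1).foldl
    (fun sv i =>
      if PySem.List.pyGetD bank i 0 > sv.1 then (PySem.List.pyGetD bank i 0, i) else sv)
    (0, 0)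

-- the recursion `batteries(start, selected)`; fuel 12 suffices from the entry call
-- (each step appends one element, and the recursion stops when len(selected) == 12)
def overclockBatteries (bank : List Int) : Nat → Int → List Int → List Int
  | 0, _, selected => selected
  | fuel + 1, start, selected =>
      if selected.length = 12 then selected
      else
        let r := overclockScanA bank start (PySem.List.len bank - 12 + selected.length + 1)
        overclockBatteries bank fuel (r.2 + 1) (selected ++ [r.1])

-- joltage: sum(d * 10**i for (i, d) in enumerate(reversed(batteries))); indices are ≥ 0 so .toNat is exact
def overclockJoltage (bs : List Int) : Int :=
  ((PySem.List.enumerate bs.reverse).map (fun p => p.2 * 10 ^ p.1.toNat)).sum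

def overclock (bank : List Int) : Int :=
  overclockJoltage (overclockBatteries bank 12 0 [])

-- ===== PORT B =====
-- inner scan of Source B (best_v/best_i, strict >, defaults 0/0)
def overclockScanB (bank : List Int) (lo hi : Int) : Int × Int :=
  (PySem.List.pyRange lo hi 1).foldl
    (fun bv i =>
      if PySem.List.pyGetD bank i 0 > bv.1 then (PySem.List.pyGetD bank i 0, i) else bv)
    (0, 0)

def overclock_alt (bank : List Int) : Int :=
  (((PySem.List.pyRange 0 12 1).foldl
      (fun (st : Int × Int) c =>
        let bv := overclockScanB bank st.1 (PySem.List.len bank - 11 + c)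
        (bv.2 + 1, st.2 * 10 + bv.1))
      (0, 0))).2

-- ===== PRECONDITION & SPEC =====
def Spec_overclock (bank : List Int) (out : Int) : Prop := out = overclock_alt bank
instance (bank : List Int) (out : Int) : Decidable (Spec_overclock bank out) := by unfold Spec_overclock; infer_instance

-- ===== CLAIM (what is proved, stated in full; the proofs are below) =====
def Claim_equal_overclock : Prop := ∀ (bank : List Int), Dom_overclock bank → Spec_overclock bank (overclock bank)

-- ===== LEMMAS AND PROOFS =====

-- Horner accumulator as used by B
def pvHorner (l : List Int) (a : Int) : Int := l.foldl (fun r v => r * 10 + v) a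

theorem pvHorner_shift (l : List Int) (a : Int) :
    pvHorner l a = a * 10 ^ l.length + pvHorner l 0 := by
  induction l generalizing a with
  | nil => simp [pvHorner]
  | cons v t ih =>
      simp only [pvHorner, List.foldl_cons, List.length_cons]
      rw [show (t.foldl (fun r v => r * 10 + v) (a * 10 + v)) = pvHorner t (a * 10 + v) from rfl,
          show (t.foldl (fun r v => r * 10 + v) (0 * 10 + v)) = pvHorner t (0 * 10 + v) from rfl,
          ih (a * 10 + v), ih (0 * 10 + v)]
      ring

theorem pvJoltage_eq_horner (l : List Int) : overclockJoltage l = pvHorner l 0 := by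
  induction l with
  | nil => simp [overclockJoltage, pvHorner]
  | cons x t ih =>
      simp only [overclockJoltage, List.reverse_cons] at *
      rw [PySem.List.enumerate_append]
      simp only [List.map_append, List.sum_append, List.length_reverse]
      rw [ih]
      simp only [PySem.List.enumerate, List.map_cons, List.map_nil, List.sum_cons, List.sum_nil]
      rw [show pvHorner (x :: t) 0 = pvHorner t (0 * 10 + x) from rfl, pvHorner_shift t (0 * 10 + x)]
      simp
      ring

theorem pvMain (bank : List Int) :
    ∀ (fuel : Nat) (start : Int) (sel : List Int), sel.length + fuel = 12 →
    pvHorner (overclockBatteries bank fuel start sel) 0 =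
      ((PySem.List.pyRange (sel.length : Int) 12 1).foldl
        (fun (st : Int × Int) c =>
          let bv := overclockScanB bank st.1 (PySem.List.len bank - 11 + c)
          (bv.2 + 1, st.2 * 10 + bv.1))
        (start, pvHorner sel 0)).2 := by
  intro fuel
  induction fuel with
  | zero =>
      intro start sel h
      rw [overclockBatteries, PySem.List.pyRange_one_eq_nil (by omega)]
      rfl
  | succ f ih =>
      intro start sel h
      have hlt : sel.length < 12 := by omega
      rw [overclockBatteries, if_neg (by omega)]
      rw [ih ((overclockScanA bank start (PySem.List.len bank - 12 + sel.length + 1)).2 + 1)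
          (sel ++ [(overclockScanA bank start (PySem.List.len bank - 12 + sel.length + 1)).1])
          (by simp; omega)]
      rw [PySem.List.pyRange_one_cons (show (sel.length : Int) < 12 by exact_mod_cast hlt)]
      simp only [List.foldl_cons]
      have hsc : overclockScanB bank start (PySem.List.len bank - 11 + sel.length) =
          overclockScanA bank start (PySem.List.len bank - 12 + sel.length + 1) := by
        rw [overclockScanA, overclockScanB]
        ring_nf
      have hH : pvHorner (sel ++ [(overclockScanA bank start (PySem.List.len bank - 12 + sel.length + 1)).1]) 0 =
          pvHorner sel 0 * 10 +
            (overclockScanA bank start (PySem.List.len bank - 12 + sel.length + 1)).1 := by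
        simp [pvHorner, List.foldl_append]
      rw [hH]
      push_cast
      rw [hsc]
      simp

-- ===== VERDICT (by name: the statement is the Claim_ definition above) =====
theorem overclock_spec : Claim_equal_overclock := by
  intro bank _
  show overclock bank = overclock_alt bank
  rw [overclock, pvJoltage_eq_horner, overclock_alt]
  have := pvMain bank 12 0 []
  simpa [pvHorner] using this rfl
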